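-- pv_equiv track=rewrite | github.com/MatteoGradinaru-UCLL/coursematerial_2425 | 07-tuples/11-assignment-heatwave/student.py | heatwave
-- ===== SOURCE A (Python) =====
-- def heatwave(temperatures):
--
--     count_25 = 0
--     count_30 = 0
--
--     for i in temperatures:
--         if i >= 25:
--             count_25 += 1
--
--             if i >= 30:
--                 count_30 += 1
--
--
--             if count_25 >= 5 and count_30 >= 3:
--                 return True
--         else:
--
--             count_25 = 0
--             count_30 = 0
--
--     return False
-- ===== SOURCE B (Python) =====
-- def heatwave(temperatures):
--     i, n = 0, len(temperatures)
--     while i < n: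
--         if temperatures[i] >= 25:
--             # collect the maximal run of consecutive days >= 25 starting at i
--             run = []
--             j = i
--             while j < n and temperatures[j] >= 25:
--                 run.append(temperatures[j])
--                 j += 1
--             if len(run) >= 5 and sum(1 for x in run if x >= 30) >= 3:
--                 return True
--             i = j
--         else:
--             i += 1
--     return False
-- ===== Notes on version B (the rewrite author's own statement) =====
-- stated objective: alternative
-- what changed: B splits the input into maximal runs of consecutive days >= 25 and tests each whole run for length >= 5 and at least 3 days >= 30, instead of A's single scan with two counters reset on cold days and an early-return check after every hot day.
import Mathlib
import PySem

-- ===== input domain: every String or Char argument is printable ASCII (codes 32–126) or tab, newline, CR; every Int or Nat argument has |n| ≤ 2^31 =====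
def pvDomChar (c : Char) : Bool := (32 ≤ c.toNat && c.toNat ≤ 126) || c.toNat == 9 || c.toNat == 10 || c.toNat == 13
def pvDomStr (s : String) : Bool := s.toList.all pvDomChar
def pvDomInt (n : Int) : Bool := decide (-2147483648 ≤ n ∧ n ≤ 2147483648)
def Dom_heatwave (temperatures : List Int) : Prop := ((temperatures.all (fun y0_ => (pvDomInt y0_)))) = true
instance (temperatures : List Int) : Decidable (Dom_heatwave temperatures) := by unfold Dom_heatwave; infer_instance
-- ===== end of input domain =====

-- B replaces A's counter-resetting scan by splitting the input into maximal runs of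
-- consecutive days >= 25 and testing each whole run; same return value, alternative decomposition.

-- ===== PORT A =====
-- A's for-loop with the two counters and the early return, as structural recursion.
def heatwaveLoopA : List Int → Int → Int → Bool
  | [], _, _ => false
  | i :: rest, count25, count30 =>
    if i ≥ 25 then
      let count25' := count25 + 1
      let count30' := if i ≥ 30 then count30 + 1 else count30
      if count25' ≥ 5 ∧ count30' ≥ 3 then true
      else heatwaveLoopA rest count25' count30'
    else heatwaveLoopA rest 0 0

def heatwave (temperatures : List Int) : Bool :=
  heatwaveLoopA temperatures 0 0

-- ===== PORT B =====
-- inner while loop of Source B: collect the maximal prefix run of days >= 25, return (run, rest)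
def hotSpan : List Int → List Int × List Int
  | [] => ([], [])
  | t :: rest =>
    if t ≥ 25 then
      let p := hotSpan rest
      (t :: p.1, p.2)
    else ([], t :: rest)

theorem hotSpan_rest_le : ∀ xs : List Int, (hotSpan xs).2.length ≤ xs.length := by
  intro xs
  induction xs with
  | nil => simp [hotSpan]
  | cons t rest ih =>
    simp only [hotSpan]
    split
    · simpa using Nat.le_succ_of_le ih
    · simp

-- outer while loop of Source B, on the remaining suffix ts
def heatwave_alt (temperatures : List Int) : Bool :=
  match temperatures with
  | [] => false
  | t :: rest =>
    if t ≥ 25 then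
      let p := hotSpan (t :: rest)
      if p.1.length ≥ 5 ∧ p.1.countP (fun x => decide (x ≥ 30)) ≥ 3 then true
      else heatwave_alt p.2
    else heatwave_alt rest
termination_by temperatures.length
decreasing_by
  · simp only [hotSpan, if_pos ‹t ≥ 25›]
    exact Nat.lt_succ_of_le (hotSpan_rest_le rest)
  · simp

-- ===== PRECONDITION & SPEC =====
def Spec_heatwave (temperatures : List Int) (out : Bool) : Prop := out = heatwave_alt temperatures
instance (temperatures : List Int) (out : Bool) : Decidable (Spec_heatwave temperatures out) := by unfold Spec_heatwave; infer_instance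

-- ===== CLAIM (what is proved, stated in full; the proofs are below) =====
def Claim_equal_heatwave : Prop := ∀ (temperatures : List Int), Dom_heatwave temperatures → Spec_heatwave temperatures (heatwave temperatures)

-- ===== LEMMAS AND PROOFS =====

-- A's inner behaviour over one maximal hot run: it returns true during the run iff the
-- run is nonempty and the counters at the run's end meet both thresholds; otherwise it
-- continues with reset counters on the rest.
theorem loopA_span (xs : List Int) : ∀ (c25 c30 : Int),
    heatwaveLoopA xs c25 c30 =
      (if (hotSpan xs).1 ≠ [] ∧ c25 + (hotSpan xs).1.length ≥ 5 ∧
          c30 + ((hotSpan xs).1.countP (fun x => decide (x ≥ 30)) : Int) ≥ 3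
       then true else heatwaveLoopA (hotSpan xs).2 0 0) := by
  induction xs with
  | nil => intro c25 c30; simp [heatwaveLoopA, hotSpan]
  | cons t rest ih =>
    intro c25 c30
    by_cases ht : t ≥ 25
    · rcases h : hotSpan rest with ⟨run, r⟩
      have hspan : hotSpan (t :: rest) = (t :: run, r) := by
        simp [hotSpan, ht, h]
      have ih' := fun a b => (ih a b).trans (by rw [h])
      simp only [heatwaveLoopA, if_pos ht, hspan, ih', List.length_cons,
        List.countP_cons, decide_eq_true_eq]
      by_cases hnil : run = []
      · subst hnil
        have hlen : ([] : List Int).length = 0 := rfl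
        simp only [ne_eq, not_true_eq_false, false_and, if_false, List.length_nil,
          List.countP_nil, List.cons_ne_nil, not_false_eq_true, true_and]
        by_cases h30 : t ≥ 30 <;>
          simp only [h30, if_true, if_false] <;>
          push_cast <;> split_ifs <;> first | rfl | (exfalso; omega)
      · have hlen : 1 ≤ run.length := List.length_pos_iff.mpr hnil
        simp only [ne_eq, hnil, not_false_eq_true, true_and, List.cons_ne_nil]
        by_cases h30 : t ≥ 30 <;>
          simp only [h30, if_true, if_false] <;>
          push_cast <;> split_ifs <;> first | rfl | (exfalso; omega)
    · have hspan : hotSpan (t :: rest) = ([], t :: rest) := by simp [hotSpan, ht]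
      simp [heatwaveLoopA, ht, hspan]

theorem loopA_eq_alt (xs : List Int) : heatwaveLoopA xs 0 0 = heatwave_alt xs := by
  induction hn : xs.length using Nat.strong_induction_on generalizing xs with
  | _ n ihn =>
    cases xs with
    | nil => simp [heatwaveLoopA, heatwave_alt]
    | cons t rest =>
      subst hn
      by_cases ht : t ≥ 25
      · rcases h : hotSpan rest with ⟨run, r⟩
        have hspan : hotSpan (t :: rest) = (t :: run, r) := by simp [hotSpan, ht, h]
        have hr : r.length ≤ rest.length := by
          have := hotSpan_rest_le rest
          rw [h] at this; exact this
        rw [heatwave_alt, if_pos ht, hspan, loopA_span (t :: rest) 0 0, hspan]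
        rw [ihn r.length (by simpa using Nat.lt_succ_of_le hr) r rfl]
        simp only [ne_eq, List.cons_ne_nil, not_false_eq_true, true_and, zero_add]
        split_ifs with h1 h2 h2 <;> first | rfl | (exfalso; push_cast at h1 h2; omega)
      · rw [heatwave_alt, if_neg ht, ← ihn rest.length (by simp) rest rfl]
        simp [heatwaveLoopA, ht]

-- ===== VERDICT (by name: the statement is the Claim_ definition above) =====
theorem heatwave_spec : Claim_equal_heatwave := by
  intro ts _
  unfold Spec_heatwave heatwave
  exact loopA_eq_alt ts
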